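-- pv_equiv track=rewrite | github.com/draton-lang/draton | tools/verify_selfhost_phase1.py | build_content_statements
-- ===== SOURCE A (Python) =====
-- def escape_drat_string(value: str) -> str:
--     escaped = (
--         value.replace("\\", "\\\\")
--         .replace("\"", "\\\"")
--     )
--     return escaped
--
-- def build_content_statements(content: str) -> str:
--     lines = ['    let mut content = ""']
--     chunk = []
--
--     def flush_chunk() -> None:
--         if not chunk:
--             return
--         fragment = escape_drat_string("".join(chunk))
--         lines.append(f'    content = str_concat(content, "{fragment}")')
--         chunk.clear()
--
--     for ch in content:
--         if ch == "\n":
--             flush_chunk()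
--             lines.append("    content = str_concat(content, ascii_char(10))")
--         elif ch == "\r":
--             flush_chunk()
--             lines.append("    content = str_concat(content, ascii_char(13))")
--         elif ch == "\t":
--             flush_chunk()
--             lines.append("    content = str_concat(content, ascii_char(9))")
--         else:
--             chunk.append(ch)
--
--     flush_chunk()
--     return "\n".join(lines)
-- ===== SOURCE B (Python) =====
-- def build_content_statements(content: str) -> str:
--     special = {"\n": 10, "\r": 13, "\t": 9}
--     lines = ['    let mut content = ""']
--     i = 0
--     n = len(content)
--     while i < n:
--         ch = content[i]
--         if ch in special:
--             lines.append(f"    content = str_concat(content, ascii_char({special[ch]}))")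
--             i += 1
--         else:
--             j = i + 1
--             while j < n and content[j] not in special:
--                 j += 1
--             fragment = content[i:j].replace("\\", "\\\\").replace("\"", "\\\"")
--             lines.append(f'    content = str_concat(content, "{fragment}")')
--             i = j
--     return "\n".join(lines)
-- ===== Notes on version B (the rewrite author's own statement) =====
-- stated objective: alternative
-- what changed: Replaces A's chunk buffer and flush helper with a dict of special characters and a two-pointer scan that finds each plain run in one inner scan and emits its statement directly.
import Mathlib
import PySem

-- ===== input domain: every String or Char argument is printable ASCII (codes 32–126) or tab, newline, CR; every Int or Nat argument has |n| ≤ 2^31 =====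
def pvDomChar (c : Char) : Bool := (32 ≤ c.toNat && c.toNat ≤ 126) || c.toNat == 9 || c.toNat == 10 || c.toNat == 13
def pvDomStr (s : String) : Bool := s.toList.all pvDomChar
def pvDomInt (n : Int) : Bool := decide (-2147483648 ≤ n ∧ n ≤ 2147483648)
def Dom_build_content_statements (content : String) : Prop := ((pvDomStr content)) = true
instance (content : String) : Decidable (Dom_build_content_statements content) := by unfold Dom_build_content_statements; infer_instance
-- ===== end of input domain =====

-- B replaces A's chunk buffer + flush helper by a dict of special characters and a
-- two-pointer scan emitting each plain run's statement directly (alternative decomposition).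

-- ===== PORT A =====
def pvEscapeA (value : String) : String :=
  PySem.Str.replace (PySem.Str.replace value "\\" "\\\\") "\"" "\\\""

def pvFlushA (lines : List String) (chunk : List Char) : List String :=
  if chunk = [] then lines
  else lines ++ ["    content = str_concat(content, \"" ++ pvEscapeA (String.ofList chunk) ++ "\")"]

def pvLoopA : List Char → List String → List Char → List String
  | [], lines, chunk => pvFlushA lines chunk
  | c :: rest, lines, chunk =>
    if c = '\n' then
      pvLoopA rest (pvFlushA lines chunk ++ ["    content = str_concat(content, ascii_char(10))"]) []
    else if c = '\r' then
      pvLoopA rest (pvFlushA lines chunk ++ ["    content = str_concat(content, ascii_char(13))"]) []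
    else if c = '\t' then
      pvLoopA rest (pvFlushA lines chunk ++ ["    content = str_concat(content, ascii_char(9))"]) []
    else
      pvLoopA rest lines (chunk ++ [c])

def build_content_statements (content : String) : String :=
  PySem.Str.join "\n" (pvLoopA content.toList ["    let mut content = \"\""] [])

-- ===== PORT B =====
def pvSpecialB : PySem.Dict Char Int := PySem.Dict.ofList [('\n', 10), ('\r', 13), ('\t', 9)]

-- inner while loop: advance j while j < n and content[j] not in special
def pvScanRunB (cs : List Char) (n j : Nat) : Nat :=
  if _h : j < n then
    if pvSpecialB.contains (cs.getD j ' ') then j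
    else pvScanRunB cs n (j + 1)
  else j
termination_by n - j

-- cited by pvLoopB's decreasing_by
theorem pvScanRunB_ge (cs : List Char) (n j : Nat) : j ≤ pvScanRunB cs n j := by
  unfold pvScanRunB
  split
  · split
    · exact Nat.le_refl j
    · exact Nat.le_trans (Nat.le_succ j) (pvScanRunB_ge cs n (j + 1))
  · exact Nat.le_refl j
termination_by n - j

-- outer while loop (content[i] is in range whenever read, so getD is exact)
def pvLoopB (cs : List Char) (n i : Nat) (lines : List String) : List String :=
  if _h : i < n then
    if pvSpecialB.contains (cs.getD i ' ') then
      pvLoopB cs n (i + 1) (lines ++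
        ["    content = str_concat(content, ascii_char(" ++
          PySem.Int.toStr ((pvSpecialB.get? (cs.getD i ' ')).getD 0) ++ "))"])
    else
      pvLoopB cs n (pvScanRunB cs n (i + 1)) (lines ++
        ["    content = str_concat(content, \"" ++
          PySem.Str.replace (PySem.Str.replace
            (String.ofList (PySem.List.slice cs (some (i : Int)) (some ((pvScanRunB cs n (i + 1) : Nat) : Int))))
            "\\" "\\\\") "\"" "\\\"" ++ "\")"])
  else lines
termination_by n - i
decreasing_by
  · omega
  · have := pvScanRunB_ge cs n (i + 1); omega

def build_content_statements_alt (content : String) : String :=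
  PySem.Str.join "\n" (pvLoopB content.toList content.toList.length 0 ["    let mut content = \"\""])

-- ===== PRECONDITION & SPEC =====
def Spec_build_content_statements (content : String) (out : String) : Prop := out = build_content_statements_alt content
instance (content : String) (out : String) : Decidable (Spec_build_content_statements content out) := by unfold Spec_build_content_statements; infer_instance

-- ===== CLAIM (what is proved, stated in full; the proofs are below) =====
def Claim_equal_build_content_statements : Prop := ∀ (content : String), Dom_build_content_statements content → Spec_build_content_statements content (build_content_statements content)

-- ===== LEMMAS AND PROOFS =====

-- "not special" predicate
def pvNs (c : Char) : Bool := !(c == '\n' || c == '\r' || c == '\t')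

def pvAscii (c : Char) : String :=
  "    content = str_concat(content, ascii_char(" ++ PySem.Int.toStr ((pvSpecialB.get? c).getD 0) ++ "))"

def pvSeg (l : List Char) : String :=
  "    content = str_concat(content, \"" ++ pvEscapeA (String.ofList l) ++ "\")"

-- clean list-level reference implementation both ports are reduced to
def pvBList : List Char → List String
  | [] => []
  | c :: rest =>
    if pvNs c then pvSeg (c :: rest.takeWhile pvNs) :: pvBList (rest.dropWhile pvNs)
    else pvAscii c :: pvBList rest
termination_by l => l.length
decreasing_by
  · have := List.length_dropWhile_le (p := pvNs) (l := rest); simp; omega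
  · simp

theorem pvContains_eq (c : Char) : pvSpecialB.contains c = !pvNs c := by
  simp [pvSpecialB, pvNs, PySem.Dict.ofList, PySem.Dict.update, PySem.Dict.contains_insert,
    Bool.or_comm]

theorem pvFlushA_factor (lines : List String) (chunk : List Char) :
    pvFlushA lines chunk = lines ++ pvFlushA [] chunk := by
  unfold pvFlushA; split <;> simp

theorem pvLoopA_factor (l : List Char) (lines : List String) (chunk : List Char) :
    pvLoopA l lines chunk = lines ++ pvLoopA l [] chunk := by
  induction l generalizing lines chunk with
  | nil => exact pvFlushA_factor lines chunk
  | cons c rest ih =>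
    simp only [pvLoopA]
    split_ifs
    · conv_lhs => rw [ih]
      conv_rhs => rw [ih]
      rw [pvFlushA_factor lines chunk]; simp
    · conv_lhs => rw [ih]
      conv_rhs => rw [ih]
      rw [pvFlushA_factor lines chunk]; simp
    · conv_lhs => rw [ih]
      conv_rhs => rw [ih]
      rw [pvFlushA_factor lines chunk]; simp
    · exact ih lines (chunk ++ [c])

theorem pvLoopB_factor (cs : List Char) (n i : Nat) (lines : List String) :
    pvLoopB cs n i lines = lines ++ pvLoopB cs n i [] := by
  unfold pvLoopB
  split
  · split
    · rw [pvLoopB_factor cs n (i + 1), pvLoopB_factor cs n (i + 1) ([] ++ _)]; simp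
    · rw [pvLoopB_factor cs n (pvScanRunB cs n (i + 1)),
        pvLoopB_factor cs n (pvScanRunB cs n (i + 1)) ([] ++ _)]; simp
  · simp
termination_by n - i
decreasing_by
  all_goals first
    | omega
    | (have := pvScanRunB_ge cs n (i + 1); omega)

theorem pvTake_len_takeWhile (p : Char → Bool) (l : List Char) :
    l.take (l.takeWhile p).length = l.takeWhile p := by
  induction l with
  | nil => simp
  | cons c rest ih => by_cases h : p c <;> simp [h, ih]

theorem pvDrop_len_takeWhile (p : Char → Bool) (l : List Char) :
    l.drop (l.takeWhile p).length = l.dropWhile p := by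
  induction l with
  | nil => simp
  | cons c rest ih => by_cases h : p c <;> simp [h, ih]

theorem pvScanRunB_eq (cs : List Char) (j : Nat) (hj : j ≤ cs.length) :
    pvScanRunB cs cs.length j = j + ((cs.drop j).takeWhile pvNs).length := by
  unfold pvScanRunB
  split
  · next h =>
    have hdrop : cs.drop j = cs[j] :: cs.drop (j + 1) := List.drop_eq_getElem_cons h
    have hget : cs.getD j ' ' = cs[j] := List.getD_eq_getElem cs ' ' h
    rw [hget]
    split
    · next hsp =>
      rw [pvContains_eq] at hsp
      rw [hdrop]
      simp only [List.takeWhile_cons, Bool.not_eq_eq_eq_not.mp hsp]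
      simp
    · next hsp =>
      rw [pvContains_eq] at hsp
      have hns : pvNs cs[j] = true := by
        cases hb : pvNs cs[j] <;> simp [hb] at hsp ⊢
      rw [pvScanRunB_eq cs (j + 1) h, hdrop]
      simp only [List.takeWhile_cons, hns, if_true, List.length_cons]
      omega
  · next h =>
    have : j = cs.length := by omega
    subst this
    simp
termination_by cs.length - j

theorem pvLoopB_eq_bList (cs : List Char) (i : Nat) (hi : i ≤ cs.length) :
    pvLoopB cs cs.length i [] = pvBList (cs.drop i) := by
  unfold pvLoopB
  split
  · next h =>
    have hdrop : cs.drop i = cs[i] :: cs.drop (i + 1) := List.drop_eq_getElem_cons h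
    have hget : cs.getD i ' ' = cs[i] := List.getD_eq_getElem cs ' ' h
    rw [hget]
    split
    · next hsp =>
      rw [pvContains_eq] at hsp
      have hns : pvNs cs[i] = false := Bool.not_eq_eq_eq_not.mp hsp
      rw [pvLoopB_factor, pvLoopB_eq_bList cs (i + 1) h, hdrop, pvBList]
      simp only [hns, pvAscii]
      simp
    · next hsp =>
      rw [pvContains_eq] at hsp
      have hns : pvNs cs[i] = true := by
        cases hb : pvNs cs[i] <;> simp [hb] at hsp ⊢
      have hj : pvScanRunB cs cs.length (i + 1)
          = (i + 1) + ((cs.drop (i + 1)).takeWhile pvNs).length := pvScanRunB_eq cs (i + 1) h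
      have htwle : ((cs.drop (i + 1)).takeWhile pvNs).length ≤ cs.length - (i + 1) := by
        have h1 := (List.takeWhile_sublist (l := cs.drop (i + 1)) pvNs).length_le
        simp at h1
        omega
      have hjle : pvScanRunB cs cs.length (i + 1) ≤ cs.length := by omega
      rw [pvLoopB_factor, pvLoopB_eq_bList cs _ hjle]
      have hslice : PySem.List.slice cs (some (i : Int)) (some ((pvScanRunB cs cs.length (i + 1) : Nat) : Int))
          = cs[i] :: (cs.drop (i + 1)).takeWhile pvNs := by
        rw [PySem.List.slice_natCast]
        rw [hj, hdrop]
        have : i + 1 + ((cs.drop (i + 1)).takeWhile pvNs).length - i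
            = ((cs.drop (i + 1)).takeWhile pvNs).length + 1 := by omega
        rw [this, List.take_succ_cons, pvTake_len_takeWhile]
      have hdropj : cs.drop (pvScanRunB cs cs.length (i + 1)) = (cs.drop (i + 1)).dropWhile pvNs := by
        rw [hj, ← pvDrop_len_takeWhile pvNs (cs.drop (i + 1)), List.drop_drop]
      rw [hslice, hdropj, hdrop, pvBList]
      simp only [hns, pvSeg, pvEscapeA]
      simp
  · next h =>
    have : i = cs.length := by omega
    subst this
    simp [pvBList]
termination_by cs.length - i
decreasing_by
  · omega
  · have := pvScanRunB_ge cs cs.length (i + 1); omega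

theorem pvLoopA_eq_bList (l : List Char) :
    pvLoopA l [] [] = pvBList l ∧
      ∀ chunk : List Char, chunk ≠ [] →
        pvLoopA l [] chunk = pvSeg (chunk ++ l.takeWhile pvNs) :: pvBList (l.dropWhile pvNs) := by
  induction l with
  | nil =>
    refine ⟨by simp [pvLoopA, pvFlushA, pvBList], fun chunk hc => ?_⟩
    simp [pvLoopA, pvFlushA, hc, pvSeg, pvBList]
  | cons c rest ih =>
    have hasciiN : pvAscii '\n' = "    content = str_concat(content, ascii_char(10))" := by decide
    have hasciiR : pvAscii '\x0d' = "    content = str_concat(content, ascii_char(13))" := by decide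
    have hasciiT : pvAscii '\t' = "    content = str_concat(content, ascii_char(9))" := by decide
    constructor
    · by_cases h1 : c = '\n'
      · subst h1
        simp only [pvLoopA, pvFlushA, Char.reduceEq, reduceIte, List.nil_append]
        rw [pvLoopA_factor, ih.1]
        simp [pvBList, pvNs, hasciiN]
      · by_cases h2 : c = '\x0d'
        · subst h2
          simp only [pvLoopA, pvFlushA, Char.reduceEq, reduceIte, List.nil_append]
          rw [pvLoopA_factor, ih.1]
          simp [pvBList, pvNs, hasciiR]
        · by_cases h3 : c = '\t'
          · subst h3
            simp only [pvLoopA, pvFlushA, Char.reduceEq, reduceIte, List.nil_append]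
            rw [pvLoopA_factor, ih.1]
            simp [pvBList, pvNs, hasciiT]
          · have hns : pvNs c = true := by simp [pvNs, h1, h2, h3]
            simp only [pvLoopA, if_neg h1, if_neg h2, if_neg h3, List.nil_append]
            rw [(ih.2) [c] (by simp)]
            simp [pvBList, hns]
    · intro chunk hc
      by_cases h1 : c = '\n'
      · subst h1
        simp only [pvLoopA, Char.reduceEq, reduceIte]
        rw [pvLoopA_factor, ih.1, pvFlushA, if_neg hc]
        simp [pvBList, pvNs, hasciiN, pvSeg]
      · by_cases h2 : c = '\x0d'
        · subst h2
          simp only [pvLoopA, Char.reduceEq, reduceIte]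
          rw [pvLoopA_factor, ih.1, pvFlushA, if_neg hc]
          simp [pvBList, pvNs, hasciiR, pvSeg]
        · by_cases h3 : c = '\t'
          · subst h3
            simp only [pvLoopA, Char.reduceEq, reduceIte]
            rw [pvLoopA_factor, ih.1, pvFlushA, if_neg hc]
            simp [pvBList, pvNs, hasciiT, pvSeg]
          · have hns : pvNs c = true := by simp [pvNs, h1, h2, h3]
            simp only [pvLoopA, if_neg h1, if_neg h2, if_neg h3]
            rw [(ih.2) (chunk ++ [c]) (by simp)]
            simp [hns]

-- ===== VERDICT (by name: the statement is the Claim_ definition above) =====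
theorem build_content_statements_spec : Claim_equal_build_content_statements := by
  intro content _
  unfold Spec_build_content_statements build_content_statements build_content_statements_alt
  rw [pvLoopA_factor, pvLoopB_factor, (pvLoopA_eq_bList content.toList).1,
    pvLoopB_eq_bList content.toList 0 (Nat.zero_le _)]
  simp
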